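-- pv_equiv track=rewrite | github.com/skwuwu/Analemma-Os | analemma-workflow-os/backend/src/models/plan_briefing.py | _calculate_risk_from_impacts
-- ===== SOURCE A (Python) =====
-- from typing import List, Optional, Dict, Any, Set
-- from enum import Enum
--
-- class RiskLevel(str, Enum):
--     """위험 수준 열거형"""
--     LOW = "low"         # 낮은 위험 - 읽기 전용 작업, 외부 영향 없음
--     MEDIUM = "medium"   # 중간 위험 - 제한된 외부 영향, 되돌릴 수 있음
--     HIGH = "high"       # 높은 위험 - 되돌릴 수 없는 외부 영향 (이메일 발송, 결제 등)
--
-- class ImpactScope(str, Enum):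
--     """
--     [v2.1] 영향 범위 열거형
--
--     Gemini가 RiskLevel을 결정할 때 참고하는 객관적 기준.
--
--     Risk Mapping Guide:
--     - READ_ONLY: LOW
--     - DATABASE_WRITE, FILESYSTEM: MEDIUM (rollback 가능)
--     - EMAIL, NOTIFICATION: MEDIUM/HIGH (발송 후 취소 불가)
--     - PAYMENT, EXTERNAL_API: HIGH (되돌릴 수 없음)
--     """
--     READ_ONLY = "read_only"           # 읽기 전용 (DB 조회, 파일 읽기)
--     DATABASE_WRITE = "database_write" # DB 쓰기 (롤백 가능)
--     FILESYSTEM = "filesystem"         # 파일 시스템 변경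
--     EMAIL = "email"                   # 이메일 발송 (발송 후 취소 불가)
--     NOTIFICATION = "notification"     # 알림 발송 (Slack, SMS 등)
--     EXTERNAL_API = "external_api"     # 외부 API 호출 (부작용 가능)
--     PAYMENT = "payment"               # 결제/금융 트랜잭션
--     AUTHENTICATION = "authentication" # 인증/권한 변경
--     SCHEDULED_TASK = "scheduled_task" # 예약 작업 등록
--
-- IMPACT_TO_RISK_MAPPING: Dict[ImpactScope, RiskLevel] = {
--     ImpactScope.READ_ONLY: RiskLevel.LOW,
--     ImpactScope.DATABASE_WRITE: RiskLevel.MEDIUM,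
--     ImpactScope.FILESYSTEM: RiskLevel.MEDIUM,
--     ImpactScope.EMAIL: RiskLevel.HIGH,
--     ImpactScope.NOTIFICATION: RiskLevel.MEDIUM,
--     ImpactScope.EXTERNAL_API: RiskLevel.HIGH,
--     ImpactScope.PAYMENT: RiskLevel.HIGH,
--     ImpactScope.AUTHENTICATION: RiskLevel.HIGH,
--     ImpactScope.SCHEDULED_TASK: RiskLevel.MEDIUM,
-- }
--
-- def _calculate_risk_from_impacts(impact_scopes: Set[ImpactScope]) -> RiskLevel:
--     """
--     [v2.1] 영향 범위에서 최대 위험도 계산.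
--
--     여러 ImpactScope 중 가장 높은 위험도를 반환.
--     """
--     if not impact_scopes:
--         return RiskLevel.LOW
--
--     risk_priority = {RiskLevel.LOW: 0, RiskLevel.MEDIUM: 1, RiskLevel.HIGH: 2}
--     max_risk = RiskLevel.LOW
--
--     for scope in impact_scopes:
--         risk = IMPACT_TO_RISK_MAPPING.get(scope, RiskLevel.LOW)
--         if risk_priority[risk] > risk_priority[max_risk]:
--             max_risk = risk
--
--     return max_risk
-- ===== SOURCE B (Python) =====
-- HIGH_SCOPES = frozenset({"email", "external_api", "payment", "authentication"})
-- MEDIUM_SCOPES = frozenset({"database_write", "filesystem", "notification", "scheduled_task"})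
--
-- def _calculate_risk_from_impacts(impact_scopes):
--     if not HIGH_SCOPES.isdisjoint(impact_scopes):
--         return "high"
--     if not MEDIUM_SCOPES.isdisjoint(impact_scopes):
--         return "medium"
--     return "low"
-- ===== Notes on version B (the rewrite author's own statement) =====
-- stated objective: idiomatic
-- what changed: Replaced the running-max scan with priority dict by two precomputed frozensets (HIGH/MEDIUM scopes) tested with set intersection and tiered early returns.
import Mathlib
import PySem

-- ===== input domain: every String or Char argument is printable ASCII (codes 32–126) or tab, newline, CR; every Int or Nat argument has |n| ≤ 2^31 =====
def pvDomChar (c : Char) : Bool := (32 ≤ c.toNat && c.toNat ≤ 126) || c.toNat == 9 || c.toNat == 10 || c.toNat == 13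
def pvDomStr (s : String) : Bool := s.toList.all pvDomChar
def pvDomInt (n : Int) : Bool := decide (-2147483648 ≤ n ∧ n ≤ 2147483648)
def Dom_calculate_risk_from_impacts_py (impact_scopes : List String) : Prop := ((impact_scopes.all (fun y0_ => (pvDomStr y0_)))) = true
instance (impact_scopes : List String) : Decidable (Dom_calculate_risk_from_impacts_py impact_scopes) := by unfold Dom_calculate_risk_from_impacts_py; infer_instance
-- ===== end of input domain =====

-- B replaces A's running-max loop over a priority dict by two constant scope sets tested with
-- set intersection and tiered early returns (idiomatic; return value only).

-- ===== PORT A =====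
def pvMapping : PySem.Dict String String := PySem.Dict.mk
  [("read_only","low"),("database_write","medium"),("filesystem","medium"),
   ("email","high"),("notification","medium"),("external_api","high"),
   ("payment","high"),("authentication","high"),("scheduled_task","medium")]

def pvPriority : PySem.Dict String Int := PySem.Dict.mk [("low",0),("medium",1),("high",2)]

-- one iteration of A's loop body
def pvStepA (max_risk scope : String) : String :=
  let risk := PySem.Dict.getD pvMapping scope "low"
  if PySem.Dict.getD pvPriority risk 0 > PySem.Dict.getD pvPriority max_risk 0 then risk
  else max_risk

def calculate_risk_from_impacts_py (impact_scopes : List String) : String :=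
  if impact_scopes = [] then "low"
  else impact_scopes.foldl pvStepA "low"

-- ===== PORT B =====
def pvHighScopes : PySem.Set String :=
  PySem.Set.ofList ["email", "external_api", "payment", "authentication"]
def pvMediumScopes : PySem.Set String :=
  PySem.Set.ofList ["database_write", "filesystem", "notification", "scheduled_task"]

def calculate_risk_from_impacts_py_alt (impact_scopes : List String) : String :=
  if impact_scopes.any (fun s => pvHighScopes.contains s) then "high"
  else if impact_scopes.any (fun s => pvMediumScopes.contains s) then "medium"
  else "low"

-- ===== PRECONDITION & SPEC =====
def Spec_calculate_risk_from_impacts_py (impact_scopes : List String) (out : String) : Prop := out = calculate_risk_from_impacts_py_alt impact_scopes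
instance (impact_scopes : List String) (out : String) : Decidable (Spec_calculate_risk_from_impacts_py impact_scopes out) := by unfold Spec_calculate_risk_from_impacts_py; infer_instance

-- ===== CLAIM (what is proved, stated in full; the proofs are below) =====
def Claim_equal_calculate_risk_from_impacts_py : Prop := ∀ (impact_scopes : List String), Dom_calculate_risk_from_impacts_py impact_scopes → Spec_calculate_risk_from_impacts_py impact_scopes (calculate_risk_from_impacts_py impact_scopes)

-- ===== LEMMAS AND PROOFS =====

theorem pvHighScopes_eq : pvHighScopes = ["email", "external_api", "payment", "authentication"] := by
  decide

theorem pvMediumScopes_eq :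
    pvMediumScopes = ["database_write", "filesystem", "notification", "scheduled_task"] := by
  decide

-- the mapping lookup, characterised through B's two scope sets
theorem pvRisk_char (s : String) : PySem.Dict.getD pvMapping s "low" =
    (if s ∈ pvHighScopes then "high"
     else if s ∈ pvMediumScopes then "medium" else "low") := by
  by_cases h1 : s = "read_only"
  · subst h1; decide
  by_cases h2 : s = "database_write"
  · subst h2; decide
  by_cases h3 : s = "filesystem"
  · subst h3; decide
  by_cases h4 : s = "email"
  · subst h4; decide
  by_cases h5 : s = "notification"
  · subst h5; decide
  by_cases h6 : s = "external_api"
  · subst h6; decide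
  by_cases h7 : s = "payment"
  · subst h7; decide
  by_cases h8 : s = "authentication"
  · subst h8; decide
  by_cases h9 : s = "scheduled_task"
  · subst h9; decide
  have g1 := Ne.symm h1; have g2 := Ne.symm h2; have g3 := Ne.symm h3
  have g4 := Ne.symm h4; have g5 := Ne.symm h5; have g6 := Ne.symm h6
  have g7 := Ne.symm h7; have g8 := Ne.symm h8; have g9 := Ne.symm h9
  simp [pvMapping, PySem.Dict.getD, PySem.Dict.get?, pvHighScopes_eq, pvMediumScopes_eq,
    g1, g2, g3, g4, g5, g6, g7, g8, g9, h1, h2, h3, h4, h5, h6, h7, h8, h9]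

-- no high scope is a medium scope
theorem pvNotBoth (x : String) (hH : x ∈ pvHighScopes) (hM : x ∈ pvMediumScopes) : False := by
  rw [pvHighScopes_eq] at hH
  rw [pvMediumScopes_eq] at hM
  simp at hH hM
  rcases hH with rfl | rfl | rfl | rfl <;> simp at hM

-- one loop step of A, characterised through B's scope sets (for the three reachable accumulators)
theorem pvStepA_char (mx x : String) (hmx : mx = "low" ∨ mx = "medium" ∨ mx = "high") :
    pvStepA mx x = (if x ∈ pvHighScopes then "high"
                    else if x ∈ pvMediumScopes then (if mx = "low" then "medium" else mx)
                    else mx) := by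
  rcases hmx with rfl | rfl | rfl <;>
    by_cases hH : x ∈ pvHighScopes <;>
    by_cases hM : x ∈ pvMediumScopes <;>
    first
      | exact (pvNotBoth x hH hM).elim
      | (simp only [pvStepA, pvRisk_char]
         simp [hH, hM, pvPriority, PySem.Dict.getD, PySem.Dict.get?])

-- invariant of A's fold: the result depends only on which of B's scope sets are hit
theorem pvFold_inv (xs : List String) : ∀ mx : String, (mx = "low" ∨ mx = "medium" ∨ mx = "high") →
    xs.foldl pvStepA mx
    = (if (∃ s ∈ xs, s ∈ pvHighScopes) ∧ mx ≠ "high" then "high"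
       else if (∃ s ∈ xs, s ∈ pvMediumScopes) ∧ mx = "low" then "medium"
       else mx) := by
  induction xs with
  | nil => intro mx hmx; rcases hmx with rfl | rfl | rfl <;> simp
  | cons x xs ih =>
    intro mx hmx
    rw [List.foldl_cons, pvStepA_char mx x hmx]
    by_cases hH : x ∈ pvHighScopes
    · rw [if_pos hH, ih "high" (by simp)]
      rcases hmx with rfl | rfl | rfl <;> simp [hH]
    · rw [if_neg hH]
      by_cases hM : x ∈ pvMediumScopes
      · rw [if_pos hM]
        rcases hmx with rfl | rfl | rfl
        · rw [if_pos rfl, ih "medium" (by simp)]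
          simp [hH, hM]
        · rw [if_neg (by decide), ih "medium" (by simp)]
          simp [hH, hM]
        · rw [if_neg (by decide), ih "high" (by simp)]
          simp [hH, hM]
      · rw [if_neg hM, ih mx hmx]
        simp [hH, hM]

-- ===== VERDICT (by name: the statement is the Claim_ definition above) =====
theorem calculate_risk_from_impacts_py_spec : Claim_equal_calculate_risk_from_impacts_py := by
  intro xs _
  unfold Spec_calculate_risk_from_impacts_py calculate_risk_from_impacts_py
    calculate_risk_from_impacts_py_alt
  by_cases hxs : xs = []
  · simp [hxs]
  · rw [if_neg hxs, pvFold_inv xs "low" (Or.inl rfl)]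
    simp
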